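-- pv_equiv track=rewrite | github.com/strdaniil/bio_research | simulation.py | synteny_blocks
-- ===== SOURCE A (Python) =====
-- def synteny_blocks(genome1, genome2):
--     pos_in_B = {gene: idx for idx, gene in enumerate(genome2)}
--     blocks = []
--     i = 0
--     while i < len(genome1):
--         gene = genome1[i]
--         if gene in pos_in_B:
--             j = pos_in_B[gene]
--             block_len = 1
--             while i + block_len < len(genome1):
--                 next_gene = genome1[i + block_len]
--                 if next_gene in pos_in_B and pos_in_B[next_gene] == j + block_len:
--                     block_len += 1
--                 else:
--                     break
--             blocks.append(block_len)
--             i += block_len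
--         else:
--             i += 1
--     return blocks
-- ===== SOURCE B (Python) =====
-- def synteny_blocks(genome1, genome2):
--     pos_in_B = {gene: idx for idx, gene in enumerate(genome2)}
--     mapped = [pos_in_B.get(g) for g in genome1]
--     blocks = []
--     prev_key = None
--     run = 0
--     for i, v in enumerate(mapped):
--         key = None if v is None else v - i
--         if key is not None and key == prev_key:
--             run += 1
--         else:
--             if run:
--                 blocks.append(run)
--             run = 1 if key is not None else 0
--         prev_key = key
--     if run:
--         blocks.append(run)
--     return blocks
-- ===== Notes on version B (the rewrite author's own statement) =====
-- stated objective: idiomatic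
-- what changed: B maps genome1 to positions in genome2 once and then makes a single accumulator pass grouping consecutive indices by the invariant pos - i, replacing A's nested while loops with manual index jumps.
import Mathlib
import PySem

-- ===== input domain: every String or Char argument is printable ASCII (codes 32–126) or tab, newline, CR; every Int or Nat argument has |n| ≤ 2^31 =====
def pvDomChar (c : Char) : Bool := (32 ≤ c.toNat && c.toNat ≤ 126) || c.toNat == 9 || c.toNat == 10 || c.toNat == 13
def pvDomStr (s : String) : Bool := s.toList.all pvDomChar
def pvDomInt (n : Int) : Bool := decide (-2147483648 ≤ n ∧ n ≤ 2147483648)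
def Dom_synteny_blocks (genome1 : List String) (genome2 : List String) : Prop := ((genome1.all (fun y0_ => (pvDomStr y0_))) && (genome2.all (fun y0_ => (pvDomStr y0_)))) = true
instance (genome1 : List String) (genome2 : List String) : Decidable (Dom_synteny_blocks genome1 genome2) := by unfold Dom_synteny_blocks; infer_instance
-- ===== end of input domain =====

-- B replaces A's nested while loops (with manual index jumps) by mapping genome1 to
-- positions once and grouping consecutive positions in one accumulator pass (idiomatic,
-- same cost). Both programs are total; return values only, no mutation.

-- ===== PORT A =====
-- pos_in_B = {gene: idx for idx, gene in enumerate(genome2)}  (shared: both A and B build this dict)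
def pvPosB (genome2 : List String) : PySem.Dict String Int :=
  (PySem.List.enumerate genome2 0).foldl (fun d p => d.insert p.2 p.1) PySem.Dict.empty

-- inner while loop of A: scanning the suffix starting at i + block_len
-- (index arithmetic genome1[i + block_len] rendered as consuming that suffix)
def pvAInner (d : PySem.Dict String Int) (j : Int) : Int → List String → Int × List String
  | bl, [] => (bl, [])
  | bl, g :: gs =>
    match d.get? g with
    | some p => if p = j + bl then pvAInner d j (bl + 1) gs else (bl, g :: gs)
    | none => (bl, g :: gs)

-- needed by pvAOuter's termination (cited in decreasing_by)
theorem pvAInner_len (d : PySem.Dict String Int) (j : Int) :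
    ∀ (bl : Int) (gs : List String), (pvAInner d j bl gs).2.length ≤ gs.length := by
  intro bl gs
  induction gs generalizing bl with
  | nil => simp [pvAInner]
  | cons g gs ih =>
    simp only [pvAInner]
    cases d.get? g with
    | none => simp
    | some p =>
      by_cases h : p = j + bl
      · simp only [h]
        exact le_trans (ih (bl + 1)) (Nat.le_succ _)
      · simp [h]

-- outer while loop of A: i advances by block_len (skip the consumed suffix) or by 1
def pvAOuter (d : PySem.Dict String Int) : List String → List Int
  | [] => []
  | g :: gs =>
    match d.get? g with
    | some j =>
      let r := pvAInner d j 1 gs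
      r.1 :: pvAOuter d r.2
    | none => pvAOuter d gs
termination_by l => l.length
decreasing_by
  · exact Nat.lt_succ_of_le (pvAInner_len d j 1 gs)
  · simp

def synteny_blocks (genome1 : List String) (genome2 : List String) : List Int :=
  pvAOuter (pvPosB genome2) genome1

-- ===== PORT B =====
-- one step of Source B's for-loop over enumerate(mapped): state = (prev_key, run, blocks)
def pvBStep (st : Option Int × Int × List Int) (iv : Int × Option Int) :
    Option Int × Int × List Int :=
  let key : Option Int := match iv.2 with | none => none | some v => some (v - iv.1)
  if key ≠ none ∧ key = st.1 then (key, st.2.1 + 1, st.2.2)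
  else (key, (if key ≠ none then 1 else 0), if st.2.1 ≠ 0 then st.2.2 ++ [st.2.1] else st.2.2)

def synteny_blocks_alt (genome1 : List String) (genome2 : List String) : List Int :=
  let pos := pvPosB genome2
  let mapped := genome1.map (fun g => pos.get? g)
  let st := (PySem.List.enumerate mapped 0).foldl pvBStep (none, 0, [])
  if st.2.1 ≠ 0 then st.2.2 ++ [st.2.1] else st.2.2

-- ===== PRECONDITION & SPEC =====
def Spec_synteny_blocks (genome1 : List String) (genome2 : List String) (out : List Int) : Prop := out = synteny_blocks_alt genome1 genome2
instance (genome1 : List String) (genome2 : List String) (out : List Int) : Decidable (Spec_synteny_blocks genome1 genome2 out) := by unfold Spec_synteny_blocks; infer_instance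

-- ===== CLAIM (what is proved, stated in full; the proofs are below) =====
def Claim_equal_synteny_blocks : Prop := ∀ (genome1 : List String) (genome2 : List String), Dom_synteny_blocks genome1 genome2 → Spec_synteny_blocks genome1 genome2 (synteny_blocks genome1 genome2)

-- ===== LEMMAS AND PROOFS =====

-- A's two loops, expressed on the mapped list of optional positions
def pvInnerM (j : Int) : Int → List (Option Int) → Int × List (Option Int)
  | bl, [] => (bl, [])
  | bl, o :: rest => if o = some (j + bl) then pvInnerM j (bl + 1) rest else (bl, o :: rest)

theorem pvInnerM_len (j : Int) :
    ∀ (bl : Int) (m : List (Option Int)), (pvInnerM j bl m).2.length ≤ m.length := by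
  intro bl m
  induction m generalizing bl with
  | nil => simp [pvInnerM]
  | cons o rest ih =>
    simp only [pvInnerM]
    by_cases h : o = some (j + bl)
    · simp only [h]
      exact le_trans (ih (bl + 1)) (Nat.le_succ _)
    · simp [h]

def pvBlocksM : List (Option Int) → List Int
  | [] => []
  | none :: rest => pvBlocksM rest
  | some j :: rest =>
    let r := pvInnerM j 1 rest
    r.1 :: pvBlocksM r.2
termination_by m => m.length
decreasing_by
  · simp
  · exact Nat.lt_succ_of_le (pvInnerM_len j 1 rest)

theorem pvAInner_map (d : PySem.Dict String Int) (j : Int) :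
    ∀ (bl : Int) (gs : List String),
      pvInnerM j bl (gs.map (fun g => d.get? g)) =
        ((pvAInner d j bl gs).1, (pvAInner d j bl gs).2.map (fun g => d.get? g)) := by
  intro bl gs
  induction gs generalizing bl with
  | nil => simp [pvInnerM, pvAInner]
  | cons g gs ih =>
    simp only [List.map_cons, pvInnerM, pvAInner]
    cases hg : d.get? g with
    | none => simp [hg]
    | some p =>
      by_cases h : p = j + bl
      · simp only [h]
        exact ih (bl + 1)
      · simp [h, hg]

theorem pvAOuter_map (d : PySem.Dict String Int) :
    ∀ (gs : List String), pvAOuter d gs = pvBlocksM (gs.map (fun g => d.get? g)) := by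
  intro gs
  induction hn : gs.length using Nat.strong_induction_on generalizing gs with
  | _ n ih =>
    have hn' := hn
    cases gs with
    | nil => simp [pvAOuter, pvBlocksM]
    | cons g gs' =>
      have hlen1 : gs'.length + 1 = n := by simpa using hn
      simp only [pvAOuter, List.map_cons]
      cases hg : d.get? g with
      | none =>
        simp only [pvBlocksM]
        exact ih gs'.length (by omega) gs' rfl
      | some j =>
        simp only [pvBlocksM, pvAInner_map d j 1 gs']
        have hlen : (pvAInner d j 1 gs').2.length < n := by
          have := pvAInner_len d j 1 gs'
          omega
        exact congrArg _ (ih _ hlen _ rfl)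

-- finalisation after Source B's loop, and the three shapes of one loop step
def pvFin (st : Option Int × Int × List Int) : List Int :=
  if st.2.1 ≠ 0 then st.2.2 ++ [st.2.1] else st.2.2

theorem pvBStep_absent (p : Option Int) (run : Int) (blocks : List Int) (t : Int) :
    pvBStep (p, run, blocks) (t, none) =
      (none, 0, if run ≠ 0 then blocks ++ [run] else blocks) := by
  simp [pvBStep]

theorem pvBStep_cont (k run : Int) (blocks : List Int) (t v : Int) (h : v - t = k) :
    pvBStep (some k, run, blocks) (t, some v) = (some k, run + 1, blocks) := by
  simp [pvBStep, h]

theorem pvBStep_break (p : Option Int) (run : Int) (blocks : List Int) (t v : Int)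
    (h : some (v - t) ≠ p) :
    pvBStep (p, run, blocks) (t, some v) =
      (some (v - t), 1, if run ≠ 0 then blocks ++ [run] else blocks) := by
  simp only [pvBStep]
  rw [if_neg]
  · simp
  · intro hc
    exact h hc.2

theorem pvFold_both :
    ∀ (m : List (Option Int)),
      (∀ (t : Int) (blocks : List Int),
        pvFin ((PySem.List.enumerate m t).foldl pvBStep (none, 0, blocks)) = blocks ++ pvBlocksM m) ∧
      (∀ (t k run : Int) (blocks : List Int), 1 ≤ run →
        pvFin ((PySem.List.enumerate m t).foldl pvBStep (some k, run, blocks)) =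
          blocks ++ (pvInnerM (k + t - run) run m).1 :: pvBlocksM (pvInnerM (k + t - run) run m).2) := by
  intro m
  induction m with
  | nil =>
    constructor
    · intro t blocks; simp [PySem.List.enumerate_nil, pvFin, pvBlocksM]
    · intro t k run blocks hrun
      have hrz : run ≠ 0 := by omega
      simp [PySem.List.enumerate_nil, pvFin, pvInnerM, pvBlocksM, hrz]
  | cons o rest ih =>
    constructor
    · intro t blocks
      cases o with
      | none =>
        rw [PySem.List.enumerate_cons, List.foldl_cons, pvBStep_absent]
        have hnz : (if (0:Int) ≠ 0 then blocks ++ [(0:Int)] else blocks) = blocks := by simp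
        rw [hnz, ih.1 (t + 1) blocks]
        simp [pvBlocksM]
      | some v =>
        rw [PySem.List.enumerate_cons, List.foldl_cons,
            pvBStep_break none 0 blocks t v (by simp)]
        have hnz : (if (0:Int) ≠ 0 then blocks ++ [(0:Int)] else blocks) = blocks := by simp
        rw [hnz]
        have h2 := ih.2 (t + 1) (v - t) 1 blocks (le_refl 1)
        have harg : v - t + (t + 1) - 1 = v := by ring
        rw [harg] at h2
        rw [h2]
        simp [pvBlocksM]
    · intro t k run blocks hrun
      have hrz : run ≠ 0 := by omega
      cases o with
      | none =>
        rw [PySem.List.enumerate_cons, List.foldl_cons, pvBStep_absent]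
        rw [if_pos hrz, ih.1 (t + 1) (blocks ++ [run])]
        have hmatch : pvInnerM (k + t - run) run (none :: rest) = (run, none :: rest) := by
          simp [pvInnerM]
        rw [hmatch]
        simp [pvBlocksM]
      | some v =>
        by_cases hv : v = k + t
        · -- the run continues through this element
          rw [PySem.List.enumerate_cons, List.foldl_cons,
              pvBStep_cont k run blocks t v (by omega)]
          have h2 := ih.2 (t + 1) k (run + 1) blocks (by omega)
          have harg : k + (t + 1) - (run + 1) = k + t - run := by ring
          rw [harg] at h2
          have hmatch : pvInnerM (k + t - run) run (some v :: rest) =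
              pvInnerM (k + t - run) (run + 1) rest := by
            have hsum : k + t - run + run = v := by omega
            simp [pvInnerM, hsum]
          rw [hmatch]
          exact h2
        · -- the run breaks; a new run of length 1 starts here
          rw [PySem.List.enumerate_cons, List.foldl_cons,
              pvBStep_break (some k) run blocks t v (by simp; omega)]
          rw [if_pos hrz]
          have h2 := ih.2 (t + 1) (v - t) 1 (blocks ++ [run]) (le_refl 1)
          have harg : v - t + (t + 1) - 1 = v := by ring
          rw [harg] at h2
          rw [h2]
          have hmatch : pvInnerM (k + t - run) run (some v :: rest) = (run, some v :: rest) := by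
            simp only [pvInnerM]
            rw [if_neg (by intro hc; simp only [Option.some.injEq] at hc; omega)]
          rw [hmatch]
          simp [pvBlocksM]

-- ===== VERDICT (by name: the statement is the Claim_ definition above) =====
theorem synteny_blocks_spec : Claim_equal_synteny_blocks := by
  intro genome1 genome2 _
  unfold Spec_synteny_blocks synteny_blocks synteny_blocks_alt
  rw [pvAOuter_map]
  have := (pvFold_both (genome1.map (fun g => (pvPosB genome2).get? g))).1 0 []
  simp only [pvFin] at this
  simpa using this.symm
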